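-- pv_equiv track=rewrite | github.com/zahra-arjm/open_up_minds_argue_bot | functions.py | compare_counts
-- ===== SOURCE A (Python) =====
-- def compare_counts(dict1, dict2):
--     # returns the words present in the first but not the second dictionary
--     non_shared_words = {word: dict1[word]
--                         for word in dict1
--                         if word not in dict2
--                         }
--     common_words_different_count = {word: dict1[word] - dict2[word]
--                                     for word in dict1
--                                     if word in dict2
--                                     and dict1[word] > dict2[word]
--                                     }
--     non_shared_words.update(common_words_different_count)
--     return non_shared_words
-- ===== SOURCE B (Python) =====
-- def compare_counts(dict1, dict2):
--     # Inverted traversal: instead of scanning dict1 twice, start with a full copy of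
--     # dict1 and let dict2 drive destructive pops: every shared word is popped from the
--     # copy and, when dict1's count exceeds, its positive surplus is recorded; the
--     # surpluses are then re-appended in dict1's insertion order.
--     missing = dict(dict1)
--     excess = {}
--     for word, count2 in dict2.items():
--         if word in missing:
--             count1 = missing.pop(word)
--             if count1 > count2:
--                 excess[word] = count1 - count2
--     for word in dict1:
--         if word in excess:
--             missing[word] = excess[word]
--     return missing
-- ===== Notes on version B (the rewrite author's own statement) =====
-- stated objective: alternative
-- what changed: A scans dict1 twice with two comprehensions and merges via dict.update; B inverts the traversal: it copies dict1, iterates dict2 popping every shared word from the copy while recording positive surpluses, then re-appends the surpluses in dict1's order.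
import Mathlib
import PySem

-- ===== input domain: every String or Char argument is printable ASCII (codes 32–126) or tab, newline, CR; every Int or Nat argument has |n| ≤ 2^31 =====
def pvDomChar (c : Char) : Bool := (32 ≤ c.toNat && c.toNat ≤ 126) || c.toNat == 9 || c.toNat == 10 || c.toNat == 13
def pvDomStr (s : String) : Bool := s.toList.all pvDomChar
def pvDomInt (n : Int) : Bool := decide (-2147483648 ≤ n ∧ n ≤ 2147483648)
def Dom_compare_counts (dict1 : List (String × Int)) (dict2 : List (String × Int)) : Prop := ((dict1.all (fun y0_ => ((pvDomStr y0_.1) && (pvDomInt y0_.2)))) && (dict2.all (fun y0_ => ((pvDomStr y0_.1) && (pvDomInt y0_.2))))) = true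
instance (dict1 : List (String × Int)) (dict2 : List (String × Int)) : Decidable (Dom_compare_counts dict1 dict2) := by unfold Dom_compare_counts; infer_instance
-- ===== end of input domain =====

-- B inverts the traversal: instead of scanning dict1 twice (two comprehensions + update),
-- it copies dict1 and lets dict2 drive destructive pops, recording positive surpluses,
-- then re-appends the surpluses in dict1's order (objective: alternative; return value only).


-- ===== PORT A =====
-- Dicts are association lists in insertion order with unique keys (the Python inputs are dicts);
-- 'word in dict2' / 'dict2[word]' are first-match membership / lookup.
def compare_counts (dict1 : List (String × Int)) (dict2 : List (String × Int)) : List (String × Int) :=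
  -- {word: dict1[word] for word in dict1 if word not in dict2}
  let non_shared_words := dict1.filter (fun p => !(dict2.any (fun q => q.1 == p.1)))
  -- {word: dict1[word] - dict2[word] for word in dict1 if word in dict2 and dict1[word] > dict2[word]}
  let common_words_different_count := dict1.filterMap (fun p =>
    match dict2.find? (fun q => q.1 == p.1) with
    | none => none
    | some q => if p.2 > q.2 then some (p.1, p.2 - q.2) else none)
  -- non_shared_words.update(common_words_different_count): the updating keys are all present in
  -- dict2, hence absent from non_shared_words, so the update appends in insertion order.
  non_shared_words ++ common_words_different_count

-- ===== PORT B =====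
-- loop body of 'for word, count2 in dict2.items()': 'if word in missing' and the value taken by
-- 'missing.pop(word)' are the one lookup 'get?'; 'erase' is the pop's removal.
def popStep (st : PySem.Dict String Int × PySem.Dict String Int) (q : String × Int) :
    PySem.Dict String Int × PySem.Dict String Int :=
  match st.1.get? q.1 with
  | some count1 =>
      if count1 > q.2 then (st.1.erase q.1, st.2.insert q.1 (count1 - q.2))
      else (st.1.erase q.1, st.2)
  | none => st

-- loop body of 'for word in dict1: if word in excess: missing[word] = excess[word]'
def fillStep (excess : PySem.Dict String Int) (missing : PySem.Dict String Int)
    (p : String × Int) : PySem.Dict String Int :=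
  match excess.get? p.1 with
  | some v => missing.insert p.1 v
  | none => missing

def compare_counts_alt (dict1 : List (String × Int)) (dict2 : List (String × Int)) : List (String × Int) :=
  -- missing = dict(dict1); excess = {}; for word, count2 in dict2.items(): …
  let st := dict2.foldl popStep (PySem.Dict.mk dict1, PySem.Dict.empty)
  -- for word in dict1: if word in excess: missing[word] = excess[word]
  (dict1.foldl (fillStep st.2) st.1).items

-- ===== PRECONDITION & SPEC =====
-- The association lists encode Python dicts, whose keys are always unique; lists with a duplicated
-- key represent no dict input at all (A's comprehensions read the first match while B's pop removes
-- the key), so exactly those lists are excluded.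
def Pre_compare_counts (dict1 : List (String × Int)) (dict2 : List (String × Int)) : Prop :=
  (dict1.map Prod.fst).Nodup ∧ (dict2.map Prod.fst).Nodup
instance (dict1 : List (String × Int)) (dict2 : List (String × Int)) : Decidable (Pre_compare_counts dict1 dict2) := by unfold Pre_compare_counts; infer_instance
def pvWitness_compare_counts : (List (String × Int)) × (List (String × Int)) :=
  ([("a", 3), ("b", 1)], [("a", 1), ("c", 2)])

def Spec_compare_counts (dict1 : List (String × Int)) (dict2 : List (String × Int)) (out : List (String × Int)) : Prop := out = compare_counts_alt dict1 dict2
instance (dict1 : List (String × Int)) (dict2 : List (String × Int)) (out : List (String × Int)) : Decidable (Spec_compare_counts dict1 dict2 out) := by unfold Spec_compare_counts; infer_instance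

-- ===== CLAIM (what is proved, stated in full; the proofs are below) =====
def Claim_equal_compare_counts : Prop := ∀ (dict1 : List (String × Int)) (dict2 : List (String × Int)), Dom_compare_counts dict1 dict2 → Pre_compare_counts dict1 dict2 → Spec_compare_counts dict1 dict2 (compare_counts dict1 dict2)

-- ===== LEMMAS AND PROOFS =====

-- find? by one key ignores entries another key was filtered away by
theorem find?_filter_key_ne (l : List (String × Int)) (k k' : String) (h : k' ≠ k) :
    (l.filter (fun p => !(p.1 == k))).find? (fun p => p.1 == k')
      = l.find? (fun p => p.1 == k') := by
  induction l with
  | nil => rfl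
  | cons p t ih =>
    by_cases hp : p.1 = k
    · have hb : (p.1 == k) = true := beq_iff_eq.mpr hp
      have h2 : (p.1 == k') = false := beq_eq_false_iff_ne.mpr (fun e => h (e ▸ hp))
      simp [hb, h2, ih]
    · have hb : (p.1 == k) = false := beq_eq_false_iff_ne.mpr hp
      cases hk : (p.1 == k') with
      | true => simp [hb, hk]
      | false => simp [hb, hk, ih]

theorem get?_erase_of_key_ne (M : PySem.Dict String Int) (k k' : String) (h : k' ≠ k) :
    (M.erase k).get? k' = M.get? k' := by
  simp only [PySem.Dict.erase, PySem.Dict.get?]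
  rw [find?_filter_key_ne M.items k k' h]

-- find? over a key-preserving filterMap of a list with unique keys
theorem find?_filterMap_key (f : (String × Int) → Option (String × Int))
    (hf : ∀ q r, f q = some r → r.1 = q.1)
    (l : List (String × Int)) (hl : (l.map Prod.fst).Nodup) (k : String) :
    (l.filterMap f).find? (fun r => r.1 == k)
      = match l.find? (fun q => q.1 == k) with
        | some q => f q
        | none => none := by
  induction l with
  | nil => rfl
  | cons q t ih =>
    simp only [List.map_cons, List.nodup_cons] at hl
    by_cases hq : q.1 = k
    · cases hfq : f q with
      | some r =>
        have hr : r.1 = q.1 := hf q r hfq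
        simp [hfq, hq, hr]
      | none =>
        have hnone : (t.filterMap f).find? (fun r => r.1 == k) = none := by
          rw [List.find?_eq_none]
          intro r hrmem
          rcases List.mem_filterMap.mp hrmem with ⟨a, hamem, hfa⟩
          have hra : r.1 = a.1 := hf a r hfa
          have hmem : a.1 ∈ t.map Prod.fst := List.mem_map.mpr ⟨a, hamem, rfl⟩
          have hka : a.1 ≠ k := fun e => (hq ▸ hl.1) (e ▸ hmem)
          intro e
          exact hka (hra ▸ beq_iff_eq.mp e)
        simp [hfq, hq, hnone]
    · cases hfq : f q with
      | some r =>
        have hr : r.1 = q.1 := hf q r hfq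
        simp [hfq, hq, hr, ih hl.2]
      | none =>
        simp [hfq, hq, ih hl.2]

-- invariant of the dict2-driven pop loop
theorem foldl_popStep (d2 : List (String × Int)) (M E : PySem.Dict String Int)
    (h2 : (d2.map Prod.fst).Nodup)
    (hE : ∀ q ∈ d2, E.contains q.1 = false) :
    d2.foldl popStep (M, E)
      = (PySem.Dict.mk (M.items.filter (fun p => !(d2.any (fun q => q.1 == p.1)))),
         PySem.Dict.mk (E.items ++ d2.filterMap (fun q =>
           match M.get? q.1 with
           | some c1 => if c1 > q.2 then some (q.1, c1 - q.2) else none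
           | none => none))) := by
  induction d2 generalizing M E with
  | nil => simp
  | cons q t ih =>
    simp only [List.map_cons, List.nodup_cons] at h2
    have hq1 : q.1 ∉ t.map Prod.fst := h2.1
    have hstep : ∀ q' ∈ t, q'.1 ≠ q.1 := by
      intro q' hq' e
      exact hq1 (e ▸ List.mem_map_of_mem (f := Prod.fst) hq')
    have hfmcongr : ∀ (M' : PySem.Dict String Int),
        (∀ q' ∈ t, M'.get? q'.1 = M.get? q'.1) →
        t.filterMap (fun q' => match M'.get? q'.1 with
          | some c1 => if c1 > q'.2 then some (q'.1, c1 - q'.2) else none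
          | none => none)
        = t.filterMap (fun q' => match M.get? q'.1 with
          | some c1 => if c1 > q'.2 then some (q'.1, c1 - q'.2) else none
          | none => none) := by
      intro M' hsame
      exact List.filterMap_congr (fun q' hq' => by rw [hsame q' hq'])
    cases hget : M.get? q.1 with
    | none =>
      have hfcongr : M.items.filter (fun p => !((q :: t).any (fun q' => q'.1 == p.1)))
          = M.items.filter (fun p => !(t.any (fun q' => q'.1 == p.1))) := by
        apply List.filter_congr
        intro p hp
        have hfind : M.items.find? (fun r => r.1 == q.1) = none := by
          have hg := hget
          simp only [PySem.Dict.get?, Option.map_eq_none_iff] at hg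
          exact hg
        have hne := List.find?_eq_none.mp hfind p hp
        have : (q.1 == p.1) = false := by
          rw [beq_eq_false_iff_ne]
          intro e
          exact hne (by simp [e])
        simp [List.any_cons, this]
      simp only [List.foldl_cons, popStep, hget]
      rw [ih M E h2.2 (fun q' hq' => hE q' (List.mem_cons_of_mem q hq'))]
      rw [hfcongr]
      simp [hget]
    | some c1 =>
      have hMitems : (M.erase q.1).items = M.items.filter (fun p => !(p.1 == q.1)) := rfl
      have hMget : ∀ q' ∈ t, (M.erase q.1).get? q'.1 = M.get? q'.1 :=
        fun q' hq' => get?_erase_of_key_ne M q.1 q'.1 (hstep q' hq')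
      have hfilter : (M.erase q.1).items.filter (fun p => !(t.any (fun q' => q'.1 == p.1)))
          = M.items.filter (fun p => !((q :: t).any (fun q' => q'.1 == p.1))) := by
        rw [hMitems, List.filter_filter]
        apply List.filter_congr
        intro p hp
        have hc : (p.1 == q.1) = (q.1 == p.1) := by
          by_cases e : p.1 = q.1
          · simp [e]
          · rw [beq_eq_false_iff_ne.mpr e, beq_eq_false_iff_ne.mpr (fun h => e h.symm)]
        simp [List.any_cons, Bool.not_or, hc, Bool.and_comm]
      by_cases hgt : c1 > q.2
      · have hEins : (E.insert q.1 (c1 - q.2)).items = E.items ++ [(q.1, c1 - q.2)] := by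
          rw [PySem.Dict.items_insert, hE q List.mem_cons_self]
          simp
        have hEcont : ∀ q' ∈ t, (E.insert q.1 (c1 - q.2)).contains q'.1 = false := by
          intro q' hq'
          rw [PySem.Dict.contains_insert]
          simp [hstep q' hq', hE q' (List.mem_cons_of_mem q hq')]
        simp only [List.foldl_cons, popStep, hget, if_pos hgt]
        rw [ih (M.erase q.1) (E.insert q.1 (c1 - q.2)) h2.2 hEcont]
        rw [hfilter, hEins, hfmcongr (M.erase q.1) hMget]
        simp [hget, hgt]
      · simp only [List.foldl_cons, popStep, hget, if_neg hgt]
        rw [ih (M.erase q.1) E h2.2 (fun q' hq' => hE q' (List.mem_cons_of_mem q hq'))]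
        rw [hfilter, hfmcongr (M.erase q.1) hMget]
        simp [hget, hgt]

-- invariant of the refill loop: fresh distinct keys append
theorem foldl_fillStep (E : PySem.Dict String Int) (d1 : List (String × Int))
    (M : PySem.Dict String Int)
    (h1 : (d1.map Prod.fst).Nodup)
    (hM : ∀ p ∈ d1, (E.get? p.1).isSome = true → M.contains p.1 = false) :
    (d1.foldl (fillStep E) M).items
      = M.items ++ d1.filterMap (fun p =>
          match E.get? p.1 with
          | some v => some (p.1, v)
          | none => none) := by
  induction d1 generalizing M with
  | nil => simp
  | cons p t ih =>
    simp only [List.map_cons, List.nodup_cons] at h1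
    cases hget : E.get? p.1 with
    | none =>
      simp only [List.foldl_cons, fillStep, hget]
      rw [ih M h1.2 (fun p' hp' => hM p' (List.mem_cons_of_mem p hp'))]
      simp [hget]
    | some v =>
      have hnc : M.contains p.1 = false := hM p List.mem_cons_self (by simp [hget])
      have hins : (M.insert p.1 v).items = M.items ++ [(p.1, v)] := by
        rw [PySem.Dict.items_insert, hnc]
        simp
      have hM' : ∀ p' ∈ t, (E.get? p'.1).isSome = true → (M.insert p.1 v).contains p'.1 = false := by
        intro p' hp' hsome
        rw [PySem.Dict.contains_insert]
        have : p'.1 ≠ p.1 := by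
          intro e
          exact h1.1 (e ▸ List.mem_map_of_mem (f := Prod.fst) hp')
        simp [this, hM p' (List.mem_cons_of_mem p hp') hsome]
    
      simp only [List.foldl_cons, fillStep, hget]
      rw [ih (M.insert p.1 v) h1.2 hM', hins]
      simp [hget]

-- ===== VERDICT (by name: the statement is the Claim_ definition above) =====
theorem compare_counts_spec : Claim_equal_compare_counts := by
  intro d1 d2 _ hpre
  obtain ⟨h1, h2⟩ := hpre
  have hkeys : (PySem.Dict.mk d1).keys.Nodup := by
    simpa [PySem.Dict.keys] using h1
  unfold Spec_compare_counts compare_counts compare_counts_alt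
  rw [foldl_popStep d2 (PySem.Dict.mk d1) PySem.Dict.empty h2
      (fun q _ => by simp [PySem.Dict.contains_empty])]
  refine Eq.trans ?_ ((foldl_fillStep _ d1 _ h1 ?_).symm)
  · -- 'missing ++ surplus' on both sides: missing parts are literally equal, surplus entries
    -- agree pointwise on dict1
    dsimp only [PySem.Dict.get?, PySem.Dict.empty, List.nil_append]
    congr 1
    apply List.filterMap_congr
    intro p hp
    have hfkey : ∀ (q r : String × Int),
        (match Option.map (fun x => x.2) (List.find? (fun r => r.1 == q.1) d1) with
         | some c1 => if c1 > q.2 then some (q.1, c1 - q.2) else none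
         | none => none) = some r → r.1 = q.1 := by
      intro q r hfq
      cases hg : Option.map (fun x => x.2) (List.find? (fun r => r.1 == q.1) d1) with
      | none =>
        rw [hg] at hfq
        have hnone : (none : Option (String × Int)) = some r := hfq
        cases hnone
      | some c1 =>
        rw [hg] at hfq
        have hfq' : (if c1 > q.2 then some (q.1, c1 - q.2) else none) = some r := hfq
        by_cases hgt : c1 > q.2
        · rw [if_pos hgt] at hfq'
          cases hfq'
          rfl
        · rw [if_neg hgt] at hfq'
          cases hfq'
    rw [find?_filterMap_key _ hfkey d2 h2 p.1]
    cases hfind : d2.find? (fun q => q.1 == p.1) with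
    | none => simp
    | some q =>
      have hqk : q.1 = p.1 := by simpa using List.find?_some hfind
      have hget : (PySem.Dict.mk d1).get? p.1 = some p.2 := by
        apply PySem.Dict.get?_of_mem_items <;> first | exact (by simpa using hp) | exact hkeys
      dsimp only [PySem.Dict.get?] at hget
      show (if p.2 > q.2 then some (p.1, p.2 - q.2) else none)
        = match Option.map (fun x => x.2)
            (match Option.map (fun x => x.2) (List.find? (fun r => r.1 == q.1) d1) with
             | some c1 => if c1 > q.2 then some (q.1, c1 - q.2) else none
             | none => none) with
          | some v => some (p.1, v)
          | none => none
      rw [hqk, hget]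
      by_cases hgt : p.2 > q.2
      · simp [hgt]
      · simp [hgt]
  · -- every word the surplus dict knows lies in dict2, hence was filtered out of 'missing'
    intro p hp hsome
    dsimp only [PySem.Dict.get?, PySem.Dict.contains, PySem.Dict.empty, List.nil_append]
      at hsome ⊢
    rcases Option.isSome_iff_exists.mp hsome with ⟨v, hv⟩
    rcases Option.map_eq_some_iff.mp hv with ⟨r, hrfind, -⟩
    have hrk : r.1 = p.1 := by simpa using List.find?_some hrfind
    have hrmem := List.mem_of_find?_eq_some hrfind
    rcases List.mem_filterMap.mp hrmem with ⟨q, hqmem, hfq⟩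
    have hrq : r.1 = q.1 := by
      cases hg : Option.map (fun x => x.2) (List.find? (fun r => r.1 == q.1) d1) with
      | none =>
        rw [hg] at hfq
        have hnone : (none : Option (String × Int)) = some r := hfq
        cases hnone
      | some c1 =>
        rw [hg] at hfq
        have hfq' : (if c1 > q.2 then some (q.1, c1 - q.2) else none) = some r := hfq
        by_cases hgt : c1 > q.2
        · rw [if_pos hgt] at hfq'
          cases hfq'
          rfl
        · rw [if_neg hgt] at hfq'
          cases hfq'
    have hany : d2.any (fun q' => q'.1 == p.1) = true :=
      List.any_eq_true.mpr ⟨q, hqmem, by simp [← hrq, hrk]⟩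
    rw [List.any_eq_false]
    intro r' hr'
    have hfalse : d2.any (fun q' => q'.1 == r'.1) = false := by
      simpa using (List.mem_filter.mp hr').2
    intro e
    have e' : r'.1 = p.1 := by simpa using e
    rw [e'] at hfalse
    rw [hfalse] at hany
    cases hany
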